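-- pv_equiv track=rewrite | github.com/bucket1582/acmipc | 자료구조/트리/2630번 색종이 만들기.py | check_all_0_or_1
-- ===== SOURCE A (Python) =====
-- def check_all_0_or_1(table):
--     all_0 = True
--     all_1 = True
--     for row in table:
--         for cell in row:
--             if cell != 0:
--                 all_0 = False
--             if cell != 1:
--                 all_1 = False
--     if all_0:
--         return 0
--     if all_1:
--         return 1
--     return -1
-- ===== SOURCE B (Python) =====
-- def check_all_0_or_1(table):
--     it = (cell for row in table for cell in row)
--     first = next(it, 0)
--     for cell in it:
--         if cell != first:
--             return -1
--     return first if first in (0, 1) else -1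
-- ===== Notes on version B (the rewrite author's own statement) =====
-- stated objective: alternative
-- what changed: B takes the first cell and scans once for any cell different from it, returning -1 at the first mismatch (early exit); only a uniform grid reaches the final test 'first in (0,1)' - no all-zero/all-one flags are maintained.
import Mathlib
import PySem

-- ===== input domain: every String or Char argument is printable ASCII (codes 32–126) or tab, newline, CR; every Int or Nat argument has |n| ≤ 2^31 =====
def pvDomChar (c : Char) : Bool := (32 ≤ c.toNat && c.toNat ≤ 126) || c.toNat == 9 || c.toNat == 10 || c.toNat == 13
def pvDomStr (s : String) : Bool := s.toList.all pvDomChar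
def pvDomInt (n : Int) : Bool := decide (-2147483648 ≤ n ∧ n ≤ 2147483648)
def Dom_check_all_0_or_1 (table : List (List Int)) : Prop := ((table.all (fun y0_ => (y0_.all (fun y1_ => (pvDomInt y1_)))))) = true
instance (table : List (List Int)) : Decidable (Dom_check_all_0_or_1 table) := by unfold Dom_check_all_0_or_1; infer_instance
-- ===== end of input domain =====

-- B tests uniformity against the first cell with early exit instead of maintaining two flags (objective: alternative).

-- ===== PORT A =====
def check_all_0_or_1 (table : List (List Int)) : Int :=
  let st := table.foldl (fun st row =>
      row.foldl (fun (p : Bool × Bool) cell =>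
        (if cell ≠ 0 then false else p.1, if cell ≠ 1 then false else p.2)) st)
    (true, true)
  if st.1 then 0
  else if st.2 then 1
  else -1

-- ===== PORT B =====
-- scan of the remaining cells: returns true at the first cell ≠ first (Python's early 'return -1')
def pvScanDiff (first : Int) : List Int → Bool
  | [] => false
  | c :: cs => if c ≠ first then true else pvScanDiff first cs

def check_all_0_or_1_alt (table : List (List Int)) : Int :=
  let flat := table.flatMap (fun row => row)
  let first := flat.headD 0
  if pvScanDiff first (flat.drop 1) then -1
  else if first = 0 ∨ first = 1 then first
  else -1

-- ===== PRECONDITION & SPEC =====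
def Spec_check_all_0_or_1 (table : List (List Int)) (out : Int) : Prop := out = check_all_0_or_1_alt table
instance (table : List (List Int)) (out : Int) : Decidable (Spec_check_all_0_or_1 table out) := by unfold Spec_check_all_0_or_1; infer_instance

-- ===== CLAIM (what is proved, stated in full; the proofs are below) =====
def Claim_equal_check_all_0_or_1 : Prop := ∀ (table : List (List Int)), Dom_check_all_0_or_1 table → Spec_check_all_0_or_1 table (check_all_0_or_1 table)

-- ===== LEMMAS AND PROOFS =====

-- ===== VERDICT (by name: the statement is the Claim_ definition above) =====
theorem pv_foldA (table : List (List Int)) (a b : Bool) :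
    table.foldl (fun st row =>
      row.foldl (fun (p : Bool × Bool) cell =>
        (if cell ≠ 0 then false else p.1, if cell ≠ 1 then false else p.2)) st) (a, b)
    = (a && table.all (fun r => r.all (fun c => c == 0)),
       b && table.all (fun r => r.all (fun c => c == 1))) := by
  induction table generalizing a b with
  | nil => simp
  | cons r rs ih =>
    have inner : ∀ (row : List Int) (a b : Bool),
        row.foldl (fun (p : Bool × Bool) cell =>
          (if cell ≠ 0 then false else p.1, if cell ≠ 1 then false else p.2)) (a, b)
        = (a && row.all (fun c => c == 0), b && row.all (fun c => c == 1)) := by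
      intro row
      induction row with
      | nil => simp
      | cons c cs ih2 =>
        intro a b
        simp only [List.foldl_cons, List.all_cons]
        rw [ih2]
        by_cases h0 : c = 0 <;> by_cases h1 : c = 1 <;> simp [h0, h1]
    rw [List.foldl_cons, inner, ih]
    simp [Bool.and_assoc]

theorem pv_scanDiff_eq (first : Int) (L : List Int) :
    pvScanDiff first L = !L.all (fun c => c == first) := by
  induction L with
  | nil => simp [pvScanDiff]
  | cons c cs ih => by_cases h : c = first <;> simp [pvScanDiff, h, ih]

theorem check_all_0_or_1_spec : Claim_equal_check_all_0_or_1 := by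
  intro table _
  unfold Spec_check_all_0_or_1 check_all_0_or_1 check_all_0_or_1_alt
  simp only [pv_foldA, Bool.true_and, pv_scanDiff_eq]
  have hz : table.all (fun r => r.all (fun c => c == 0))
      = (table.flatMap (fun row => row)).all (fun c => c == 0) := by simp
  have ho : table.all (fun r => r.all (fun c => c == 1))
      = (table.flatMap (fun row => row)).all (fun c => c == 1) := by simp
  rw [hz, ho]
  cases hf : table.flatMap (fun row => row) with
  | nil => simp
  | cons c cs =>
    simp only [List.headD_cons, List.drop_one, List.tail_cons]
    by_cases hu : ∀ x ∈ cs, x = c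
    · have hcs : cs.all (fun x => x == c) = true := by
        simp only [List.all_eq_true, beq_iff_eq]; exact hu
      by_cases h0 : c = 0
      · have : (c :: cs).all (fun x => x == 0) = true := by
          simp only [List.all_cons, List.all_eq_true, beq_iff_eq, Bool.and_eq_true]
          exact ⟨h0, fun x hx => (hu x hx).trans h0⟩
        have hall : ∀ x ∈ cs, x = 0 := fun x hx => (hu x hx).trans h0
        simp [this, h0]
        rw [if_pos hall, if_neg (by rintro ⟨x, hx, h⟩; exact h (hall x hx))]
      · by_cases h1 : c = 1
        · have hA0 : (c :: cs).all (fun x => x == 0) = false := by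
            simp [List.all_cons, h0]
          have hA1 : (c :: cs).all (fun x => x == 1) = true := by
            simp only [List.all_cons, List.all_eq_true, beq_iff_eq, Bool.and_eq_true]
            exact ⟨h1, fun x hx => (hu x hx).trans h1⟩
          have hall : ∀ x ∈ cs, x = 1 := fun x hx => (hu x hx).trans h1
          simp [hA0, hA1, h1]
          rw [if_pos hall, if_neg (by rintro ⟨x, hx, h⟩; exact h (hall x hx))]
        · have hA0 : (c :: cs).all (fun x => x == 0) = false := by
            simp [List.all_cons, h0]
          have hA1 : (c :: cs).all (fun x => x == 1) = false := by
            simp [List.all_cons, h1]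
          simp [hA0, hA1, hcs, h0, h1]
    · obtain ⟨x, hx, hne⟩ := not_forall₂.mp hu
      have hcs : cs.all (fun y => y == c) = false := by
        simp only [List.all_eq_false]; exact ⟨x, hx, by simpa using hne⟩
      have hA0 : (c :: cs).all (fun y => y == 0) = false := by
        by_cases h0 : c = 0
        · simp only [List.all_eq_false]
          exact ⟨x, List.mem_cons_of_mem _ hx, by simp; omega⟩
        · simp [List.all_cons, h0]
      have hA1 : (c :: cs).all (fun y => y == 1) = false := by
        by_cases h1 : c = 1
        · simp only [List.all_eq_false]
          exact ⟨x, List.mem_cons_of_mem _ hx, by simp; omega⟩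
        · simp [List.all_cons, h1]
      simp [hA0, hA1, hcs]
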